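-- pv_equiv track=rewrite | github.com/SuryaTeja2002-design/phishing_detector | cyber_analysis.py | _parse_whois_field
-- ===== SOURCE A (Python) =====
-- def _parse_whois_field(raw: str, keys: list) -> str:
--     for key in keys:
--         for line in raw.splitlines():
--             if line.strip().startswith(key):
--                 val = line.split(":", 1)[-1].strip()
--                 if val:
--                     return val[:80]
--     return "Unknown"
-- ===== SOURCE B (Python) =====
-- def _parse_whois_field(raw: str, keys: list) -> str:
--     best = None  # (key_index, value) with the smallest key index seen so far
--     for line in raw.splitlines():
--         val = line.split(":", 1)[-1].strip()
--         if not val: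
--             continue
--         s = line.strip()
--         idx = next((i for i, k in enumerate(keys) if s.startswith(k)), None)
--         if idx is not None and (best is None or idx < best[0]):
--             best = (idx, val[:80])
--     return best[1] if best is not None else "Unknown"
-- ===== Notes on version B (the rewrite author's own statement) =====
-- stated objective: faster
-- what changed: B replaces A's per-key rescans of all lines (outer loop over keys, inner scan over lines) with a single pass over the lines that tracks one accumulator: the (lowest key-priority index, truncated value) pair of the best matching line seen so far, rendered at the end.
import Mathlib
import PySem

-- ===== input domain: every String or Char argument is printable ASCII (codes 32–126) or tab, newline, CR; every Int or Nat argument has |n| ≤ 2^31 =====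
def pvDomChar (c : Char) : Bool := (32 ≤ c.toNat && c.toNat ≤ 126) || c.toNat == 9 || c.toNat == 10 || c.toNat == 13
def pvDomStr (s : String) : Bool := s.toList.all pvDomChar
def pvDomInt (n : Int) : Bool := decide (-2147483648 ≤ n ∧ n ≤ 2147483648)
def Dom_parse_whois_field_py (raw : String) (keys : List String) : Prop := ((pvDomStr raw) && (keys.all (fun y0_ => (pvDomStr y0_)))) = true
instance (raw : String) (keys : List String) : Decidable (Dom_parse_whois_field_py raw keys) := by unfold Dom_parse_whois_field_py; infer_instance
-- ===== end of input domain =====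

-- B replaces A's per-key rescans with ONE pass over the lines that tracks the best (lowest-priority-index, value) pair; alternative traversal, same result.
-- ===== PORT A =====
-- line.split(":", 1)[-1].strip()  (shared by both ports: both Pythons compute this expression)
def pvVal (line : String) : String :=
  PySem.Str.strip ((PySem.List.pyGet? ((PySem.Str.splitMax? line ":" 1).getD []) (-1)).getD "")

-- A's inner loop: first line matching `key` with a non-empty value
def pvScanA (key : String) : List String → Option String
  | [] => none
  | line :: rest =>
    if PySem.Str.startswith (PySem.Str.strip line) key then
      if pvVal line ≠ "" then some (PySem.Str.slice (pvVal line) none (some 80))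
      else pvScanA key rest
    else pvScanA key rest

-- A's outer loop over the keys
def pvLoopA (lines : List String) : List String → String
  | [] => "Unknown"
  | k :: ks =>
    match pvScanA k lines with
    | some v => v
    | none => pvLoopA lines ks

def parse_whois_field_py (raw : String) (keys : List String) : String :=
  pvLoopA (PySem.Str.splitlines raw) keys

-- ===== PORT B =====
-- next((i for i, k in enumerate(keys) if s.startswith(k)), None)
def pvFirstKeyIdx (s : String) : List String → Nat → Option Nat
  | [], _ => none
  | k :: ks, i => if PySem.Str.startswith s k then some i else pvFirstKeyIdx s ks (i + 1)

-- the body of B's single loop over the lines, updating `best`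
def pvStepB (keys : List String) (best : Option (Nat × String)) (line : String) : Option (Nat × String) :=
  let val := pvVal line
  if val = "" then best
  else
    match pvFirstKeyIdx (PySem.Str.strip line) keys 0 with
    | none => best
    | some i =>
      match best with
      | none => some (i, PySem.Str.slice val none (some 80))
      | some b => if i < b.1 then some (i, PySem.Str.slice val none (some 80)) else some b

def parse_whois_field_py_alt (raw : String) (keys : List String) : String :=
  match (PySem.Str.splitlines raw).foldl (pvStepB keys) none with
  | some b => b.2
  | none => "Unknown"

-- ===== PRECONDITION & SPEC =====
def Spec_parse_whois_field_py (raw : String) (keys : List String) (out : String) : Prop := out = parse_whois_field_py_alt raw keys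
instance (raw : String) (keys : List String) (out : String) : Decidable (Spec_parse_whois_field_py raw keys out) := by unfold Spec_parse_whois_field_py; infer_instance

-- ===== CLAIM =====
def Claim_equal_parse_whois_field_py : Prop := ∀ (raw : String) (keys : List String), Dom_parse_whois_field_py raw keys → Spec_parse_whois_field_py raw keys (parse_whois_field_py raw keys)

-- ===== LEMMAS AND PROOFS =====

-- a line's contribution to B's scan: (first matching key index, truncated value), if any
def pvCont (keys : List String) (line : String) : Option (Nat × String) :=
  if pvVal line = "" then none
  else (pvFirstKeyIdx (PySem.Str.strip line) keys 0).map
    (fun i => (i, PySem.Str.slice (pvVal line) none (some 80)))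

def pvMerge (b c : Option (Nat × String)) : Option (Nat × String) :=
  match c with
  | none => b
  | some (i, v) =>
    match b with
    | none => some (i, v)
    | some (bi, bv) => if i < bi then some (i, v) else some (bi, bv)

def pvShift : Option (Nat × String) → Option (Nat × String) :=
  Option.map (fun p => (p.1 + 1, p.2))

def pvRender : Option (Nat × String) → String
  | some b => b.2
  | none => "Unknown"

-- first contribution whose key index is 0
def pvFirstZero : List (Option (Nat × String)) → Option String
  | [] => none
  | some (0, v) :: _ => some v
  | _ :: rest => pvFirstZero rest

lemma pvFirstZero_none_cons (t : List (Option (Nat × String))) :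
    pvFirstZero (none :: t) = pvFirstZero t := rfl

lemma pvFirstZero_succ_cons (i : Nat) (w : String) (t : List (Option (Nat × String))) :
    pvFirstZero (some (i + 1, w) :: t) = pvFirstZero t := rfl

lemma pvFirstZero_zero_cons (v : String) (t : List (Option (Nat × String))) :
    pvFirstZero (some (0, v) :: t) = some v := rfl

lemma pvFirstKeyIdx_cons (s k : String) (ks : List String) (i : Nat) :
    pvFirstKeyIdx s (k :: ks) i =
      if PySem.Str.startswith s k then some i else pvFirstKeyIdx s ks (i + 1) := rfl

lemma pvFirstKeyIdx_nil (s : String) (i : Nat) : pvFirstKeyIdx s [] i = none := rfl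

lemma pvStepB_eq_merge (keys : List String) (b : Option (Nat × String)) (line : String) :
    pvStepB keys b line = pvMerge b (pvCont keys line) := by
  show (if pvVal line = "" then b
        else match pvFirstKeyIdx (PySem.Str.strip line) keys 0 with
          | none => b
          | some i =>
            match b with
            | none => some (i, PySem.Str.slice (pvVal line) none (some 80))
            | some p => if i < p.1 then some (i, PySem.Str.slice (pvVal line) none (some 80))
                        else some p) = _
  unfold pvCont pvMerge
  by_cases h : pvVal line = ""
  · rw [if_pos h, if_pos h]
  · rw [if_neg h, if_neg h]
    cases pvFirstKeyIdx (PySem.Str.strip line) keys 0 with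
    | none => cases b <;> rfl
    | some i =>
      rcases b with _ | ⟨bi, bv⟩
      · rfl
      · by_cases hlt : i < bi <;> simp [hlt]

lemma pvFoldB_eq (keys : List String) (lines : List String) :
    ∀ b, lines.foldl (pvStepB keys) b = (lines.map (pvCont keys)).foldl pvMerge b := by
  induction lines with
  | nil => intro b; rfl
  | cons line rest ih =>
    intro b
    simp only [List.foldl_cons, List.map_cons, pvStepB_eq_merge]
    exact ih _

lemma pvFirstKeyIdx_shift (s : String) (ks : List String) :
    ∀ n, pvFirstKeyIdx s ks n = (pvFirstKeyIdx s ks 0).map (· + n) := by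
  induction ks with
  | nil => intro n; rfl
  | cons k ks ih =>
    intro n
    rw [pvFirstKeyIdx_cons, pvFirstKeyIdx_cons]
    by_cases h : PySem.Str.startswith s k
    · rw [if_pos h, if_pos h]; simp
    · rw [if_neg h, if_neg h, ih (n + 1), ih 1]
      cases pvFirstKeyIdx s ks 0 with
      | none => rfl
      | some i => simp; omega

lemma pvCont_cons (k : String) (ks : List String) (line : String) :
    pvCont (k :: ks) line =
      (if PySem.Str.startswith (PySem.Str.strip line) k ∧ pvVal line ≠ ""
       then some (0, PySem.Str.slice (pvVal line) none (some 80))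
       else pvShift (pvCont ks line)) := by
  unfold pvCont pvShift
  by_cases hv : pvVal line = ""
  · rw [if_pos hv, if_pos hv, if_neg (fun h => h.2 hv)]
    rfl
  · rw [if_neg hv, if_neg hv, pvFirstKeyIdx_cons]
    by_cases hs : PySem.Str.startswith (PySem.Str.strip line) k
    · rw [if_pos hs, if_pos ⟨hs, hv⟩]
      rfl
    · rw [if_neg hs, if_neg (fun h => hs h.1), pvFirstKeyIdx_shift _ ks 1]
      cases pvFirstKeyIdx (PySem.Str.strip line) ks 0 <;> simp

lemma pvMerge_shift (b c : Option (Nat × String)) :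
    pvMerge (pvShift b) (pvShift c) = pvShift (pvMerge b c) := by
  rcases c with _ | ⟨i, v⟩
  · cases b <;> rfl
  · rcases b with _ | ⟨bi, bv⟩
    · rfl
    · show pvMerge (some (bi + 1, bv)) (some (i + 1, v)) = _
      by_cases h : i < bi <;>
        simp [pvMerge, pvShift, h]

lemma pvFold_shift (cs : List (Option (Nat × String))) :
    ∀ b, (cs.map pvShift).foldl pvMerge (pvShift b) = pvShift (cs.foldl pvMerge b) := by
  induction cs with
  | nil => intro b; rfl
  | cons c rest ih =>
    intro b
    simp only [List.map_cons, List.foldl_cons, pvMerge_shift]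
    exact ih _

lemma pvRender_shift (o : Option (Nat × String)) : pvRender (pvShift o) = pvRender o := by
  cases o <;> rfl

-- once index 0 is reached it is never replaced
lemma pvFold_zero_absorb (v : String) (cs : List (Option (Nat × String))) :
    cs.foldl pvMerge (some (0, v)) = some (0, v) := by
  induction cs with
  | nil => rfl
  | cons c rest ih =>
    simp only [List.foldl_cons]
    have hm : pvMerge (some (0, v)) c = some (0, v) := by
      rcases c with _ | ⟨i, w⟩
      · rfl
      · simp [pvMerge]
    rw [hm, ih]

-- if some contribution has index 0, the fold from a "no index-0" state yields the first such value
lemma pvFold_firstZero (cs : List (Option (Nat × String))) (v : String) :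
    pvFirstZero cs = some v →
    ∀ b : Option (Nat × String), (∀ bv, b ≠ some (0, bv)) →
    cs.foldl pvMerge b = some (0, v) := by
  induction cs with
  | nil => intro h; exact absurd h (by simp [pvFirstZero])
  | cons c rest ih =>
    intro h b hb
    simp only [List.foldl_cons]
    rcases c with _ | ⟨i, w⟩
    · exact ih (by rwa [pvFirstZero_none_cons] at h) b hb
    · rcases i with _ | i
      · have hw : w = v := by
          rw [pvFirstZero_zero_cons] at h
          exact Option.some_injective _ h
        subst hw
        have hm : pvMerge b (some (0, w)) = some (0, w) := by
          rcases b with _ | ⟨bi, bv⟩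
          · rfl
          · have hbi : bi ≠ 0 := fun h0 => hb bv (by rw [h0])
            simp [pvMerge, Nat.pos_of_ne_zero hbi]
        rw [hm, pvFold_zero_absorb]
      · have h' : pvFirstZero rest = some v := by rwa [pvFirstZero_succ_cons] at h
        refine ih h' _ ?_
        intro bv
        rcases b with _ | ⟨bi, bw⟩
        · simp [pvMerge]
        · have hbi : bi ≠ 0 := fun h0 => hb bw (by rw [h0])
          simp only [pvMerge]
          split_ifs <;> simp_all

-- link: A's scan for the head key = first index-0 contribution of B's pass
lemma pvFirstZero_eq_scan (k : String) (ks : List String) (lines : List String) :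
    pvFirstZero (lines.map (pvCont (k :: ks))) = pvScanA k lines := by
  induction lines with
  | nil => rfl
  | cons line rest ih =>
    simp only [List.map_cons]
    rw [pvCont_cons]
    show _ = (if PySem.Str.startswith (PySem.Str.strip line) k then
                if pvVal line ≠ "" then some (PySem.Str.slice (pvVal line) none (some 80))
                else pvScanA k rest
              else pvScanA k rest)
    by_cases hs : PySem.Str.startswith (PySem.Str.strip line) k
    · by_cases hv : pvVal line = ""
      · rw [if_neg (fun h => h.2 hv), if_pos hs, if_neg (by simp [hv])]
        have hc : pvCont ks line = none := by unfold pvCont; rw [if_pos hv]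
        have h2 : pvShift (pvCont ks line) = none := by rw [hc]; rfl
        rw [h2, pvFirstZero_none_cons, ih]
      · rw [if_pos ⟨hs, hv⟩, if_pos hs, if_pos hv, pvFirstZero_zero_cons]
    · rw [if_neg (fun h => hs h.1), if_neg hs]
      cases hc : pvCont ks line with
      | none =>
        show pvFirstZero ((none : Option (Nat × String)) :: List.map (pvCont (k :: ks)) rest) = _
        rw [pvFirstZero_none_cons, ih]
      | some p =>
        show pvFirstZero (some (p.1 + 1, p.2) :: List.map (pvCont (k :: ks)) rest) = _
        rw [pvFirstZero_succ_cons, ih]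

lemma pvScanA_none_imp (k : String) (lines : List String) (h : pvScanA k lines = none) :
    ∀ line ∈ lines, ¬ (PySem.Str.startswith (PySem.Str.strip line) k ∧ pvVal line ≠ "") := by
  induction lines with
  | nil => intro line hl; cases hl
  | cons line rest ih =>
    intro l hl
    by_cases hs : PySem.Str.startswith (PySem.Str.strip line) k
    · by_cases hv : pvVal line = ""
      · have h' : pvScanA k rest = none := by
          unfold pvScanA at h
          rwa [if_pos hs, if_neg (fun hne => hne hv)] at h
        rcases List.mem_cons.mp hl with rfl | hl
        · exact fun hh => hh.2 hv
        · exact ih h' l hl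
      · exfalso
        unfold pvScanA at h
        rw [if_pos hs, if_pos hv] at h
        cases h
    · have h' : pvScanA k rest = none := by
        unfold pvScanA at h
        rwa [if_neg hs] at h
      rcases List.mem_cons.mp hl with rfl | hl
      · exact fun hh => hs hh.1
      · exact ih h' l hl

lemma pvFold_shift_none (cs : List (Option (Nat × String))) :
    (cs.map pvShift).foldl pvMerge none = pvShift (cs.foldl pvMerge none) := by
  have h := pvFold_shift cs none
  simpa [pvShift] using h

lemma pvLoopA_cons (lines : List String) (k : String) (ks : List String) :
    pvLoopA lines (k :: ks) =
      match pvScanA k lines with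
      | some v => v
      | none => pvLoopA lines ks := rfl

-- main: A's keys-outer loop equals the rendered single-pass fold
lemma pvMain (lines : List String) :
    ∀ ks : List String, pvLoopA lines ks = pvRender ((lines.map (pvCont ks)).foldl pvMerge none) := by
  intro ks
  induction ks with
  | nil =>
    have hmap : lines.map (pvCont ([] : List String)) = lines.map (fun _ => none) := by
      apply List.map_congr_left
      intro line _
      unfold pvCont
      rw [pvFirstKeyIdx_nil]
      split_ifs <;> rfl
    rw [hmap]
    have hfold : ∀ (l : List String),
        (l.map (fun _ => (none : Option (Nat × String)))).foldl pvMerge none = none := by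
      intro l
      induction l with
      | nil => rfl
      | cons x t iht => simpa [pvMerge] using iht
    rw [hfold]
    simp [pvLoopA, pvRender]
  | cons k ks ih =>
    rw [pvLoopA_cons]
    rcases hscan : pvScanA k lines with _ | v
    · -- no line matches k with non-empty value: every contribution shifts
      have hmap : lines.map (pvCont (k :: ks)) = (lines.map (pvCont ks)).map pvShift := by
        rw [List.map_map]
        apply List.map_congr_left
        intro line hl
        rw [pvCont_cons, if_neg (pvScanA_none_imp k lines hscan line hl)]
        simp only [Function.comp_apply]
      rw [hmap, pvFold_shift_none, pvRender_shift]
      exact ih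
    · -- first line matching k wins at index 0
      have hz : pvFirstZero (lines.map (pvCont (k :: ks))) = some v := by
        rw [pvFirstZero_eq_scan, hscan]
      rw [pvFold_firstZero _ v hz none (by intro bv h; cases h)]
      simp [pvRender]

-- ===== VERDICT =====
theorem parse_whois_field_py_spec : Claim_equal_parse_whois_field_py := by
  intro raw keys _
  unfold Spec_parse_whois_field_py parse_whois_field_py parse_whois_field_py_alt
  rw [pvFoldB_eq, pvMain]
  rcases (((PySem.Str.splitlines raw).map (pvCont keys)).foldl pvMerge none) with _ | b <;> rfl
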